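-- pv_equiv track=rewrite | github.com/nicksunday/advent_of_code | 2023/day3/solution.py | get_numbers_and_coordinates
-- ===== SOURCE A (Python) =====
-- SYMBOLS = {'-', '+', '@', '&', '*', '/', '$', '=', '#', '%'}
--
-- def get_numbers_and_coordinates(engine_matrix: list) -> list:
--     number_coords = []
--     for row, data in enumerate(engine_matrix):
--         current = ''
--         coordinates = tuple()
--         for column, character in enumerate(data):
--             if character in list(SYMBOLS) + ['.']:
--                 if current != '':
--                     number_coords.append([coordinates, current])
--                 current = ''
--                 continue
--             else:
--                 if current == '':
--                     coordinates = (column, row)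
--                 current = f"{current}{character}"
--         if current != '':
--             number_coords.append([coordinates, current])
--     return number_coords
-- ===== SOURCE B (Python) =====
-- SYMBOLS = {'-', '+', '@', '&', '*', '/', '$', '=', '#', '%'}
--
-- def get_numbers_and_coordinates(engine_matrix: list) -> list:
--     number_coords = []
--     for row, data in enumerate(engine_matrix):
--         normalized = ''.join('.' if c in SYMBOLS else c for c in data)
--         col = 0
--         for piece in normalized.split('.'):
--             if piece:
--                 number_coords.append([(col, row), piece])
--             col += len(piece) + 1
--     return number_coords
-- ===== Notes on version B (the rewrite author's own statement) =====
-- stated objective: simpler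
-- what changed: B replaces A's per-character accumulate-and-flush state machine (with current-run and coordinates state) by normalising each row's symbols to '.', splitting the row on '.', and recovering each run's start column arithmetically from piece lengths.
import Mathlib
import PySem

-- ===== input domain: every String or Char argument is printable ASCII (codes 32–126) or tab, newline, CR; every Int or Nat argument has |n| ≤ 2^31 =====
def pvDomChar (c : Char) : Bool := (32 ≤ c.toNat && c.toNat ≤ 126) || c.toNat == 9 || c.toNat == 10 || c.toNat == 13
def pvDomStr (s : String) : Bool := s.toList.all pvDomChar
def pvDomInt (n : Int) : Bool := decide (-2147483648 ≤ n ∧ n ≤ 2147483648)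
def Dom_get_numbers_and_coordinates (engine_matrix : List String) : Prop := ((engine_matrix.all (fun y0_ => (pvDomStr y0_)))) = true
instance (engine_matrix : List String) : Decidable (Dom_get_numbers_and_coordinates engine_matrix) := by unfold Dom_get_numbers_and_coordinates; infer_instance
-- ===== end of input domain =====

-- B replaces A's per-character accumulate-and-flush state machine by normalising each row
-- (symbols → '.') and splitting on '.', recovering start columns arithmetically (simpler).

-- ===== PORT A =====
-- SYMBOLS (the membership test `character in list(SYMBOLS) + ['.']` only tests membership,
-- so a list literal is an exact port).
def pvSymbols : List Char := ['-', '+', '@', '&', '*', '/', '$', '=', '#', '%']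

-- one step of A's inner loop; state = (number_coords, current (as List Char), coordinates)
def pvStepA (row : Int) (s : List ((Int × Int) × String) × List Char × (Int × Int))
    (cc : Int × Char) : List ((Int × Int) × String) × List Char × (Int × Int) :=
  if (pvSymbols ++ ['.']).contains cc.2 then
    (if s.2.1 ≠ [] then s.1 ++ [(s.2.2, String.mk s.2.1)] else s.1, [], s.2.2)
  else
    (s.1, s.2.1 ++ [cc.2], if s.2.1 = [] then (cc.1, row) else s.2.2)

-- A's body for one row: inner loop, then the trailing flush.  The initial coordinates
-- `tuple()` are never appended (a flush requires current ≠ ''), so (0, 0) stands in for it.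
def pvRowA (row : Int) (acc : List ((Int × Int) × String)) (data : List Char) :
    List ((Int × Int) × String) :=
  let st := (PySem.List.enumerate data 0).foldl (pvStepA row) (acc, [], (0, 0))
  if st.2.1 ≠ [] then st.1 ++ [(st.2.2, String.mk st.2.1)] else st.1

def get_numbers_and_coordinates (engine_matrix : List String) : List ((Int × Int) × String) :=
  (PySem.List.enumerate engine_matrix 0).foldl
    (fun acc rd => pvRowA rd.1 acc rd.2.toList) []

-- ===== PORT B =====
-- ''.join('.' if c in SYMBOLS else c for c in data)
def pvNormalize (data : List Char) : List Char :=
  data.map (fun c => if pvSymbols.contains c then '.' else c)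

-- one step of B's loop over the pieces of normalized.split('.'); state = (number_coords, col)
def pvStepB (row : Int) (s : List ((Int × Int) × String) × Int) (piece : List Char) :
    List ((Int × Int) × String) × Int :=
  (if piece ≠ [] then s.1 ++ [((s.2, row), String.mk piece)] else s.1,
   s.2 + piece.length + 1)

-- B's body for one row: normalized.split('.') ported as List.splitOn '.'
def pvRowB (row : Int) (acc : List ((Int × Int) × String)) (data : List Char) :
    List ((Int × Int) × String) :=
  ((((pvNormalize data).splitOn '.')).foldl (pvStepB row) (acc, 0)).1

def get_numbers_and_coordinates_alt (engine_matrix : List String) :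
    List ((Int × Int) × String) :=
  (PySem.List.enumerate engine_matrix 0).foldl
    (fun acc rd => pvRowB rd.1 acc rd.2.toList) []

-- ===== PRECONDITION & SPEC =====
def Spec_get_numbers_and_coordinates (engine_matrix : List String) (out : List ((Int × Int) × String)) : Prop := out = get_numbers_and_coordinates_alt engine_matrix
instance (engine_matrix : List String) (out : List ((Int × Int) × String)) : Decidable (Spec_get_numbers_and_coordinates engine_matrix out) := by unfold Spec_get_numbers_and_coordinates; infer_instance

-- ===== CLAIM (what is proved, stated in full; the proofs are below) =====
def Claim_equal_get_numbers_and_coordinates : Prop := ∀ (engine_matrix : List String), Dom_get_numbers_and_coordinates engine_matrix → Spec_get_numbers_and_coordinates engine_matrix (get_numbers_and_coordinates engine_matrix)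

-- ===== LEMMAS AND PROOFS =====

theorem pv_modifyHead_nil (l : List (List Char)) :
    List.modifyHead (([] : List Char) ++ ·) l = l := by cases l <;> simp

-- A mid-run state of A's machine corresponds to B's fold with the pending run `cur`
-- prepended to the first remaining piece and the column counter rewound to the run's start.
theorem pvRow_inv (row : Int) :
    ∀ (cs : List Char) (col : Int) (acc : List ((Int × Int) × String))
      (cur : List Char) (w : Int × Int),
      (cur = [] ∨ w = (col - cur.length, row)) →
      (let st := (PySem.List.enumerate cs col).foldl (pvStepA row) (acc, cur, w)
       if st.2.1 ≠ [] then st.1 ++ [(st.2.2, String.mk st.2.1)] else st.1)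
      = ((((pvNormalize cs).splitOn '.').modifyHead (cur ++ ·)).foldl (pvStepB row)
          (acc, col - cur.length)).1 := by
  intro cs
  induction cs with
  | nil =>
    intro col acc cur w hw
    simp only [PySem.List.enumerate_nil, List.foldl_nil, pvNormalize, List.map_nil,
      List.splitOn, List.splitOnP_nil, List.modifyHead_cons, List.append_nil,
      List.foldl_cons, pvStepB]
    rcases hw with h | h
    · subst h; simp
    · subst h
      by_cases hc : cur = [] <;> simp [hc]
  | cons c cs ih =>
    intro col acc cur w hw
    rw [PySem.List.enumerate_cons, List.foldl_cons]
    by_cases hsep : (pvSymbols ++ ['.']).contains c = true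
    · -- separator (symbol or '.'): A flushes; B's first remaining piece is exactly `cur`
      have hmem' : c ∈ pvSymbols ∨ c = '.' := by
        simpa [List.contains_eq_mem] using hsep
      have hnorm : pvNormalize (c :: cs) = '.' :: pvNormalize cs := by
        rcases hmem' with h | h
        · simp [pvNormalize, List.contains_eq_mem, h]
        · subst h
          simp [pvNormalize]
      have hsplit : ('.' :: pvNormalize cs).splitOn '.' = [] :: (pvNormalize cs).splitOn '.' := by
        simp [List.splitOn, List.splitOnP_cons]
      have hA : pvStepA row (acc, cur, w) (col, c) =
          ((if cur ≠ [] then acc ++ [(w, String.mk cur)] else acc), [], w) := by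
        simp [pvStepA, List.contains_eq_mem]
        intro h
        exact hmem'.resolve_left h
      rw [hA]
      have hIH := ih (col + 1) (if cur ≠ [] then acc ++ [(w, String.mk cur)] else acc) [] w
        (Or.inl rfl)
      rw [pv_modifyHead_nil] at hIH
      simp only [List.length_nil, Nat.cast_zero, sub_zero] at hIH
      rw [hIH, hnorm, hsplit, List.modifyHead_cons, List.foldl_cons, List.append_nil]
      have hstate : pvStepB row (acc, col - cur.length) cur =
          ((if cur ≠ [] then acc ++ [(w, String.mk cur)] else acc), col + 1) := by
        unfold pvStepB
        refine Prod.ext ?_ ?_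
        · rcases hw with h | h
          · simp [h]
          · subst h
            by_cases hc : cur = [] <;> simp [hc]
        · simp only []
          omega
      rw [hstate]
    · -- kept character: extend the pending run
      have hmem : c ∉ pvSymbols ∧ c ≠ '.' := by
        simpa [List.contains_eq_mem, not_or] using hsep
      have hnorm : pvNormalize (c :: cs) = c :: pvNormalize cs := by
        simp [pvNormalize, List.contains_eq_mem, hmem.1]
      have hsplit : (c :: pvNormalize cs).splitOn '.' =
          ((pvNormalize cs).splitOn '.').modifyHead (List.cons c) := by
        simp [List.splitOn, List.splitOnP_cons, hmem.2]
      have hA : pvStepA row (acc, cur, w) (col, c) =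
          (acc, cur ++ [c], if cur = [] then (col, row) else w) := by
        simp [pvStepA, List.contains_eq_mem]
        exact hmem
      rw [hA]
      have hcol : (col + 1) - ((cur ++ [c]).length : Int) = col - cur.length := by
        simp only [List.length_append, List.length_cons, List.length_nil]
        push_cast
        ring
      have hIH := ih (col + 1) acc (cur ++ [c]) (if cur = [] then (col, row) else w)
        (by
          right
          rw [hcol]
          by_cases hc : cur = []
          · subst hc
            simp
          · rcases hw with h | h
            · exact absurd h hc
            · subst h
              simp [hc])
      rw [hcol] at hIH
      rw [hIH, hnorm, hsplit, List.modifyHead_modifyHead]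
      have harg : ((cur ++ [c]) ++ ·) = ((cur ++ ·) ∘ (List.cons c)) := by
        funext x; simp
      rw [harg]

-- per-row equality: A's row body equals B's row body
theorem pvRow_eq (row : Int) (acc : List ((Int × Int) × String)) (data : List Char) :
    pvRowA row acc data = pvRowB row acc data := by
  have h := pvRow_inv row data 0 acc [] (0, 0) (Or.inl rfl)
  rw [pv_modifyHead_nil] at h
  simpa [pvRowA, pvRowB] using h

theorem pvOuter_eq : ∀ (rows : List String) (s : Int) (acc : List ((Int × Int) × String)),
    (PySem.List.enumerate rows s).foldl (fun acc rd => pvRowA rd.1 acc rd.2.toList) acc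
    = (PySem.List.enumerate rows s).foldl (fun acc rd => pvRowB rd.1 acc rd.2.toList) acc := by
  intro rows
  induction rows with
  | nil => intro s acc; simp [PySem.List.enumerate_nil]
  | cons r rs ih =>
    intro s acc
    rw [PySem.List.enumerate_cons, List.foldl_cons, List.foldl_cons, pvRow_eq]
    exact ih (s + 1) _

-- ===== VERDICT (by name: the statement is the Claim_ definition above) =====
theorem get_numbers_and_coordinates_spec : Claim_equal_get_numbers_and_coordinates := by
  intro engine_matrix _
  unfold Spec_get_numbers_and_coordinates get_numbers_and_coordinates
    get_numbers_and_coordinates_alt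
  exact pvOuter_eq engine_matrix 0 []
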